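-- pv_equiv track=rewrite | github.com/Saputoa21/Chatbot-Reading-App---Open-ILab-Project | preprocessing_functions.py | delete_metadata
-- ===== SOURCE A (Python) =====
-- def delete_metadata(book):
--   cleaned_book = "\n".join([line.strip() for line in book.split("\n") if line.strip()])
--   lines = cleaned_book.split("\n")
--   start_idx = 0
--   end_idx = 0
--   for i, line in enumerate(lines):
--     if "*** START OF THE PROJECT GUTENBERG EBOOK" in line:
--       start_idx = i + 1
--     if "*** END OF THE PROJECT GUTENBERG EBOOK" in line:
--       end_idx = i
--       break
--   book_wo_metadata = "\n".join(lines[start_idx:end_idx])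
--   return book_wo_metadata
-- ===== SOURCE B (Python) =====
-- def delete_metadata(book):
--   cleaned_book = "\n".join([line.strip() for line in book.split("\n") if line.strip()])
--   lines = cleaned_book.split("\n")
--   end_idx = next((i for i, line in enumerate(lines)
--                   if "*** END OF THE PROJECT GUTENBERG EBOOK" in line), None)
--   if end_idx is None:
--     return ""
--   starts = [i for i, line in enumerate(lines[:end_idx + 1])
--             if "*** START OF THE PROJECT GUTENBERG EBOOK" in line]
--   start_idx = starts[-1] + 1 if starts else 0
--   return "\n".join(lines[start_idx:end_idx])
-- ===== Notes on version B (the rewrite author's own statement) =====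
-- stated objective: alternative
-- what changed: Replaced the fused single scan with mutable start/end state and a break by two independent phases: first locate the first END-marker line (returning '' immediately if absent), then take the last START-marker index at or before it via a comprehension.
import Mathlib
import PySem

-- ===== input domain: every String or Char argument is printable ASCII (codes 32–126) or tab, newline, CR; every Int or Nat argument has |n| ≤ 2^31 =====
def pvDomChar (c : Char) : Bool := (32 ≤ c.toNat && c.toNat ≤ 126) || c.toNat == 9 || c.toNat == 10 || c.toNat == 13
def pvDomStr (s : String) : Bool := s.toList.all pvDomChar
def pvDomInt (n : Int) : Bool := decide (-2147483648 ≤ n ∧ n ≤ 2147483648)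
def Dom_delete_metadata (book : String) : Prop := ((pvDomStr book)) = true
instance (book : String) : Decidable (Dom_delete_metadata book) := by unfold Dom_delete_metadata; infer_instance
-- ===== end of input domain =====

-- B replaces A's fused start/end scan with two independent marker searches (same cost, different decomposition); equal output proved for all inputs.


def pvSTART : String := "*** START OF THE PROJECT GUTENBERG EBOOK"
def pvEND : String := "*** END OF THE PROJECT GUTENBERG EBOOK"

-- ===== PORT A =====
-- A's for-loop over enumerate(lines) with mutable (start_idx, end_idx) and a break at the END marker
def dmLoop : List (Int × String) → Int → Int → Int × Int
  | [], s, e => (s, e)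
  | (i, line) :: rest, s, e =>
      let s' := if PySem.Str.isIn pvSTART line then i + 1 else s
      if PySem.Str.isIn pvEND line then (s', i)
      else dmLoop rest s' e

-- shared by both ports: the identical line-cleaning step (join of stripped non-empty lines, then split)
def dmLines (book : String) : List String :=
  let cleaned_book := PySem.Str.join "\n"
    ((((PySem.Str.split? book "\n").getD []).map PySem.Str.strip).filter (fun l => l ≠ ""))
  (PySem.Str.split? cleaned_book "\n").getD []

def delete_metadata (book : String) : String :=
  let lines := dmLines book
  let p := dmLoop (PySem.List.enumerate lines 0) 0 0
  PySem.Str.join "\n" (PySem.List.slice lines (some p.1) (some p.2))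

-- ===== PORT B =====
-- B's next(...): index of the first line containing the END marker
def dmFindEnd : List String → Int → Option Int
  | [], _ => none
  | l :: ls, i => if PySem.Str.isIn pvEND l then some i else dmFindEnd ls (i + 1)

def delete_metadata_alt (book : String) : String :=
  let lines := dmLines book
  match dmFindEnd lines 0 with
  | none => ""
  | some e =>
      let starts := ((PySem.List.enumerate (PySem.List.slice lines (some 0) (some (e + 1))) 0).filter
          (fun p => PySem.Str.isIn pvSTART p.2)).map (·.1)
      let start_idx := match PySem.List.pyGet? starts (-1) with
        | some j => j + 1
        | none => 0
      PySem.Str.join "\n" (PySem.List.slice lines (some start_idx) (some e))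

-- ===== PRECONDITION & SPEC =====
def Spec_delete_metadata (book : String) (out : String) : Prop := out = delete_metadata_alt book
instance (book : String) (out : String) : Decidable (Spec_delete_metadata book out) := by unfold Spec_delete_metadata; infer_instance

-- ===== CLAIM (what is proved, stated in full; the proofs are below) =====
def Claim_equal_delete_metadata : Prop := ∀ (book : String), Dom_delete_metadata book → Spec_delete_metadata book (delete_metadata book)

-- ===== LEMMAS AND PROOFS =====

-- last index j with i ≤ j ≤ e whose line contains the START marker (proof-only helper)
def dmLastOf : List String → Int → Int → Option Int
  | [], _, _ => none
  | l :: ls, i, e =>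
      if e < i then none else
      match dmLastOf ls (i + 1) e with
      | some j => some j
      | none => if PySem.Str.isIn pvSTART l then some i else none

theorem dmFindEnd_le {ls : List String} {i e : Int} (h : dmFindEnd ls i = some e) : i ≤ e := by
  induction ls generalizing i with
  | nil => simp [dmFindEnd] at h
  | cons l rest ih =>
      simp only [dmFindEnd] at h
      split at h
      · injection h with h'; omega
      · have := ih h; omega

theorem dmLastOf_none {ls : List String} {i e : Int} (h : e < i) : dmLastOf ls i e = none := by
  cases ls with
  | nil => rfl
  | cons l rest => simp [dmLastOf, h]

-- the fused loop equals find-first-END + last-START-before-it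
theorem dmLoop_some {ls : List String} {i e : Int} (s : Int) (h : dmFindEnd ls i = some e) :
    dmLoop (PySem.List.enumerate ls i) s 0 =
      ((match dmLastOf ls i e with | some j => j + 1 | none => s), e) := by
  induction ls generalizing i s with
  | nil => simp [dmFindEnd] at h
  | cons l rest ih =>
      simp only [dmFindEnd] at h
      rw [PySem.List.enumerate_cons]
      simp only [dmLoop]
      split at h
      · next hEnd =>
          injection h with h'; subst h'
          simp only [dmLastOf, dmLastOf_none (show (i : Int) < i + 1 by omega),
                     lt_self_iff_false, if_false, hEnd, if_true]
          split <;> simp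
      · next hEnd =>
          have hie : i + 1 ≤ e := dmFindEnd_le h
          simp only [hEnd]
          rw [ih _ h]
          have hlt : ¬ (e < i) := by omega
          simp only [dmLastOf, hlt, if_false]
          cases hLast : dmLastOf rest (i + 1) e with
          | some j => simp
          | none =>
              simp only
              cases hS : PySem.Chars.isIn pvSTART.toList l.toList <;> simp [hS]

theorem dmLoop_snd_none {ls : List String} {i s : Int} (h : dmFindEnd ls i = none) :
    (dmLoop (PySem.List.enumerate ls i) s 0).2 = 0 ∧
    (0 ≤ s → 0 ≤ i → 0 ≤ (dmLoop (PySem.List.enumerate ls i) s 0).1) := by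
  induction ls generalizing i s with
  | nil =>
      refine ⟨by simp [PySem.List.enumerate_nil, dmLoop], fun hs _ => ?_⟩
      simpa [PySem.List.enumerate_nil, dmLoop] using hs
  | cons l rest ih =>
      simp only [dmFindEnd] at h
      split at h
      · exact absurd h (by intro hh; cases hh)
      · next hEnd =>
          rw [PySem.List.enumerate_cons]
          simp only [dmLoop, hEnd]
          refine ⟨(ih h).1, fun hs hi => (ih h).2 (by split <;> omega) (by omega)⟩

-- B's starts list (over the truncated prefix) computes dmLastOf
theorem starts_getLast? (ls : List String) (i : Int) (e : Int) (n : Nat)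
    (hn : n = (e + 1 - i).toNat) :
    (((PySem.List.enumerate (ls.take n) i).filter (fun p => PySem.Str.isIn pvSTART p.2)).map (·.1)).getLast?
      = dmLastOf ls i e := by
  induction ls generalizing i n with
  | nil => simp [dmLastOf]
  | cons l rest ih =>
      cases n with
      | zero =>
          have : e < i := by omega
          simp [dmLastOf_none this]
      | succ m =>
          have hie : ¬ (e < i) := by omega
          rw [List.take_succ_cons, PySem.List.enumerate_cons]
          have hm : m = (e + 1 - (i + 1)).toNat := by omega
          simp only [List.filter_cons]
          rw [dmLastOf]
          simp only [hie, if_false]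
          cases hLast : dmLastOf rest (i + 1) e with
          | some j =>
              have htail := ih (i + 1) m hm
              rw [hLast] at htail
              simp only [PySem.Str.isIn_eq] at htail
              have hne :
                  ∀ (x : Int) (T : List Int), T.getLast? = some j → (x :: T).getLast? = some j := by
                intro x T hT
                cases T with
                | nil => simp at hT
                | cons y ys => rw [List.getLast?_cons_cons]; exact hT
              split
              · simp only [List.map_cons]
                exact hne _ _ htail
              · exact htail
          | none =>
              have htail := ih (i + 1) m hm
              rw [hLast] at htail
              have hnil : (((PySem.List.enumerate (rest.take m) (i + 1)).filter (fun p => PySem.Str.isIn pvSTART p.2)).map (·.1)) = [] :=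
                List.getLast?_eq_none_iff.mp htail
              simp only [PySem.Str.isIn_eq] at hnil
              split <;> simp [hnil]

-- ===== VERDICT (by name: the statement is the Claim_ definition above) =====
theorem delete_metadata_spec : Claim_equal_delete_metadata := by
  intro book _
  show delete_metadata book = delete_metadata_alt book
  dsimp only [delete_metadata, delete_metadata_alt]
  cases hE : dmFindEnd (dmLines book) 0 with
  | none =>
      have h := dmLoop_snd_none (s := 0) (i := 0) hE
      rw [h.1, PySem.List.slice_toNat _ (h.2 le_rfl le_rfl) le_rfl]
      dsimp only
      simp only [Int.toNat_zero, Nat.zero_sub, List.take_zero]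
      decide
  | some e =>
      have he0 : (0 : Int) ≤ e := dmFindEnd_le hE
      rw [dmLoop_some 0 hE]
      dsimp only
      have hstarts := starts_getLast? (dmLines book) 0 e (e + 1).toNat (by omega)
      rw [show PySem.List.slice (dmLines book) (some (0 : Int)) (some (e + 1)) = (dmLines book).take (e + 1).toNat from by
            rw [PySem.List.slice_toNat _ le_rfl (by omega)]; simp]
      rw [PySem.List.pyGet?_neg_one, hstarts]
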